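-- pv_equiv track=rewrite | github.com/EUDAT-B2STAGE/http-api-base | operations/rethink.py | split_and_html_strip
-- ===== SOURCE A (Python) =====
-- def split_and_html_strip(string):
--     """ Compute words from transcriptions """
--     words = []
--     START = '<'
--     END = '>'
--     skip = False
--     word = ""
--     for char in string:
--         if char == START:
--             skip = True
--             continue
--         elif char == END:
--             skip = False
--             continue
--         if skip:
--             continue
--         if char.isalpha():
--             word += char
--         elif word != "" and len(word) > 3:
--             words.append(word)  # word.lower())
--             word = ""
--
--     return set(words)
-- ===== SOURCE B (Python) =====
-- def split_and_html_strip(string):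
--     """ Compute words from transcriptions """
--     # pass 1: strip <...> regions with the same skip toggle
--     cleaned = []
--     skip = False
--     for ch in string:
--         if ch == '<':
--             skip = True
--         elif ch == '>':
--             skip = False
--         elif not skip:
--             cleaned.append(ch)
--     # pass 2: tokenize (words of alpha chars; flush only when longer than 3, no trailing flush)
--     words = []
--     word = ""
--     for ch in cleaned:
--         if ch.isalpha():
--             word += ch
--         elif word != "" and len(word) > 3:
--             words.append(word)
--             word = ""
--     return set(words)
-- ===== Notes on version B (the rewrite author's own statement) =====
-- stated objective: simpler
-- what changed: B splits A's single fused loop into two plain passes: first an HTML-strip pass with the skip toggle producing a cleaned character list, then a separate tokenization pass over it; the return value is identical, including the length>3-only flush and the dropped trailing word.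
import Mathlib
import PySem

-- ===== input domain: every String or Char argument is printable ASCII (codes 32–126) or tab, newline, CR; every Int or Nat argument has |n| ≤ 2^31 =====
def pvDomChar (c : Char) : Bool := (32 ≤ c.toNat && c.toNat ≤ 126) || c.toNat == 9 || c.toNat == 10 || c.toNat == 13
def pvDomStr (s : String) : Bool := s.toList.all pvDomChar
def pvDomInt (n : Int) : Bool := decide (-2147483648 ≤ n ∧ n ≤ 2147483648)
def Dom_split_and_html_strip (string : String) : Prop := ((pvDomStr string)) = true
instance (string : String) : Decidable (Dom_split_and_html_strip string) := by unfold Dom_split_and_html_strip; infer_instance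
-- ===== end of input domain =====

-- B separates A's fused loop into an HTML-strip pass followed by a tokenization pass (simpler decomposition; same return value).

-- ===== PORT A =====
-- one fused loop over the characters; state = (skip, word, words); word kept as List Char
def stepA (st : Bool × List Char × List String) (c : Char) : Bool × List Char × List String :=
  let (skip, word, words) := st
  if c = '<' then (true, word, words)
  else if c = '>' then (false, word, words)
  else if skip then (skip, word, words)
  else if PySem.Chars.isalpha c then (skip, word ++ [c], words)
  else if word ≠ [] ∧ word.length > 3 then (skip, [], words ++ [String.ofList word])
  else (skip, word, words)

def split_and_html_strip (string : String) : List String :=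
  PySem.Set.ofList (string.toList.foldl stepA (false, [], [])).2.2

-- ===== PORT B =====
-- pass 1: strip <...> regions (structural recursion building the cleaned list)
def stripHtml : List Char → Bool → List Char
  | [], _ => []
  | c :: cs, skip =>
    if c = '<' then stripHtml cs true
    else if c = '>' then stripHtml cs false
    else if skip then stripHtml cs skip
    else c :: stripHtml cs skip

-- pass 2: tokenize; state = (word, words)
def stepB (st : List Char × List String) (c : Char) : List Char × List String :=
  let (word, words) := st
  if PySem.Chars.isalpha c then (word ++ [c], words)
  else if word ≠ [] ∧ word.length > 3 then ([], words ++ [String.ofList word])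
  else (word, words)

def split_and_html_strip_alt (string : String) : List String :=
  PySem.Set.ofList ((stripHtml string.toList false).foldl stepB ([], [])).2

-- ===== PRECONDITION & SPEC =====
def Spec_split_and_html_strip (string : String) (out : List String) : Prop := out = split_and_html_strip_alt string
instance (string : String) (out : List String) : Decidable (Spec_split_and_html_strip string out) := by unfold Spec_split_and_html_strip; infer_instance

-- ===== CLAIM (what is proved, stated in full; the proofs are below) =====
def Claim_equal_split_and_html_strip : Prop := ∀ (string : String), Dom_split_and_html_strip string → Spec_split_and_html_strip string (split_and_html_strip string)

-- ===== LEMMAS AND PROOFS =====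

-- A's fused fold equals the tokenize fold over the stripped characters (word/words components)
theorem foldA_eq (l : List Char) (skip : Bool) (word : List Char) (words : List String) :
    (l.foldl stepA (skip, word, words)).2 = (stripHtml l skip).foldl stepB (word, words) := by
  induction l generalizing skip word words with
  | nil => simp [stripHtml]
  | cons c cs ih =>
    simp only [List.foldl_cons, stepA, stripHtml]
    by_cases h1 : c = '<'
    · simp [h1, ih]
    · by_cases h2 : c = '>'
      · simp [h2, ih]
      · by_cases hs : skip
        · simp [h1, h2, hs, ih]
        · simp only [h1, h2, hs, if_false, Bool.false_eq_true, List.foldl_cons, stepB]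
          by_cases ha : PySem.Chars.isalpha c
          · simp [ha, ih]
          · by_cases hw : word ≠ [] ∧ word.length > 3
            · simp [ha, hw, ih]
            · simp [ha, hw, ih]

-- ===== VERDICT (by name: the statement is the Claim_ definition above) =====
theorem split_and_html_strip_spec : Claim_equal_split_and_html_strip := by
  intro s _
  unfold Spec_split_and_html_strip split_and_html_strip split_and_html_strip_alt
  rw [foldA_eq]
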